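-- pv_equiv track=rewrite | github.com/zhangchizju2012/LeetCode | mockInterview/1117_1.py | check
-- ===== SOURCE A (Python) =====
-- def check(str, arr):
--     dic = {}
--     for item in arr:
--       dic[item] = 1
--     for item in str:
--       if item in dic:
--         dic.pop(item)
--     return len(dic) == 0
-- ===== SOURCE B (Python) =====
-- def check(str, arr):
--     seen = set(str)
--     return all(item in seen for item in arr)
-- ===== Notes on version B (the rewrite author's own statement) =====
-- stated objective: idiomatic
-- what changed: B builds the set of characters of str once and tests every arr item for membership, instead of A's dict of arr items consumed by deletion while scanning str.
import Mathlib
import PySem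

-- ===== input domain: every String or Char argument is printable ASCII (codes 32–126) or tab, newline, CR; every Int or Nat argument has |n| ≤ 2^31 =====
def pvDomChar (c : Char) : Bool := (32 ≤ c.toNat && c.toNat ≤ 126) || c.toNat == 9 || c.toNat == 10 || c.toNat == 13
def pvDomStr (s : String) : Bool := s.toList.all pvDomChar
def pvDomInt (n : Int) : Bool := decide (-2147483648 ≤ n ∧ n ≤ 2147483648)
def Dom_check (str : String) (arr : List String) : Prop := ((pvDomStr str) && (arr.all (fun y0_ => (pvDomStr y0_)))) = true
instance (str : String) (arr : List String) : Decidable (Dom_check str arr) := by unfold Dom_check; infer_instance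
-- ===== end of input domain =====

-- B builds the set of characters of str once and tests each arr item for membership,
-- instead of A's dict of arr items consumed by deletion while scanning str (idiomatic).

-- ===== PORT A =====
def check (str : String) (arr : List String) : Bool :=
  let dic : PySem.Dict String Int := arr.foldl (fun d item => d.insert item 1) PySem.Dict.empty
  let dic := str.toList.foldl
    (fun d c => if d.contains (String.ofList [c]) then d.erase (String.ofList [c]) else d) dic
  dic.size == 0

-- ===== PORT B =====
def check_alt (str : String) (arr : List String) : Bool :=
  let seen : PySem.Set String := PySem.Set.ofList (str.toList.map (fun c => String.ofList [c]))
  arr.all (fun item => PySem.Set.contains seen item)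

-- ===== PRECONDITION & SPEC =====
def Spec_check (str : String) (arr : List String) (out : Bool) : Prop := out = check_alt str arr
instance (str : String) (arr : List String) (out : Bool) : Decidable (Spec_check str arr out) := by unfold Spec_check; infer_instance

-- ===== CLAIM (what is proved, stated in full; the proofs are below) =====
def Claim_equal_check : Prop := ∀ (str : String) (arr : List String), Dom_check str arr → Spec_check str arr (check str arr)

-- ===== LEMMAS AND PROOFS =====

-- erasing a key removes exactly that key from the membership predicate
theorem contains_erase (d : PySem.Dict String Int) (k k' : String) :
    (d.erase k).contains k' = (d.contains k' && !(k' == k)) := by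
  simp only [PySem.Dict.erase, PySem.Dict.contains]
  by_cases h : k' = k
  · subst h; simp
  · have hb : (k' == k) = false := beq_eq_false_iff_ne.mpr h
    simp only [hb, Bool.not_false, Bool.and_true]
    rw [Bool.eq_iff_iff]
    simp only [List.any_eq_true, List.mem_filter, beq_iff_eq]
    constructor
    · rintro ⟨a, ⟨ha, _⟩, h2⟩; exact ⟨a, ha, h2⟩
    · rintro ⟨a, ha, h2⟩; exact ⟨a, ⟨ha, by simp [h2, h]⟩, h2⟩

-- a key survives A's erase loop iff it was present and is not the singleton of any scanned char
theorem contains_eraseLoop (cs : List Char) (d : PySem.Dict String Int) (k : String) :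
    ((cs.foldl (fun d c => if d.contains (String.ofList [c]) then d.erase (String.ofList [c]) else d) d).contains k)
      = (d.contains k && !((cs.map (fun c => String.ofList [c])).contains k)) := by
  induction cs generalizing d with
  | nil => simp
  | cons c cs ih =>
    simp only [List.foldl_cons, List.map_cons, List.contains_cons]
    rw [ih]
    by_cases hk : k = String.ofList [c]
    · subst hk
      split_ifs with h
      · simp [contains_erase, h]
      · simp [h]
    · have hb : (k == String.ofList [c]) = false := beq_eq_false_iff_ne.mpr hk
      split_ifs with h
      · rw [contains_erase]
        simp [hb]
      · simp [hb]

-- a dict is empty iff no key is contained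
theorem size_eq_zero_iff_contains (d : PySem.Dict String Int) :
    (d.size == 0) = true ↔ ∀ k, d.contains k = false := by
  simp only [PySem.Dict.size, PySem.Dict.contains, beq_iff_eq, List.length_eq_zero_iff]
  constructor
  · intro h k; rw [h]; simp
  · intro h
    cases hi : d.items with
    | nil => rfl
    | cons p t =>
      have := h p.1
      rw [hi] at this
      simp at this

-- membership in the initial dict built from arr
theorem contains_initDict (arr : List String) (k : String) :
    ((arr.foldl (fun d item => d.insert item (1 : Int)) PySem.Dict.empty).contains k)
      = decide (k ∈ arr) := by
  induction arr using List.reverseRecOn with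
  | nil => simp
  | append_singleton xs x ih =>
    rw [List.foldl_append]
    simp only [List.foldl_cons, List.foldl_nil, PySem.Dict.contains_insert, ih]
    by_cases h : k = x <;> simp [h]

-- ===== VERDICT (by name: the statement is the Claim_ definition above) =====
theorem check_spec : Claim_equal_check := by
  intro str arr _
  unfold Spec_check check check_alt
  simp only []
  rw [Bool.eq_iff_iff, size_eq_zero_iff_contains]
  constructor
  · intro h
    rw [List.all_eq_true]
    intro item hmem
    have := h item
    rw [contains_eraseLoop, contains_initDict] at this
    simp only [Bool.and_eq_false_iff, decide_eq_false_iff_not] at this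
    rcases this with h1 | h1
    · exact absurd hmem h1
    · simp only [Bool.not_eq_false', List.contains_iff_mem] at h1
      exact (PySem.Set.contains_iff _ _).mpr ((PySem.Set.mem_ofList _ _).mpr h1)
  · intro h k
    rw [contains_eraseLoop, contains_initDict]
    by_cases hk : k ∈ arr
    · have := List.all_eq_true.mp h k hk
      have hm := (PySem.Set.mem_ofList _ _).mp ((PySem.Set.contains_iff _ _).mp this)
      simp [hm]
    · simp [hk]
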